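-- pv_equiv track=rewrite | github.com/1seansean1/holly-grace | src/holly/agent.py | _build_anthropic_messages
-- ===== SOURCE A (Python) =====
-- def _build_anthropic_messages(history: list[dict]) -> list[dict]:
--     """Convert session history to Anthropic-format messages.
--
--     Maps roles: 'human' → 'user', 'holly' → 'assistant', 'system' → 'user' (prefixed).
--     Ensures alternating user/assistant turns (Anthropic API requirement).
--     """
--     messages = []
--     last_role = None
--
--     for msg in history:
--         role = msg.get("role", "user")
--         content = msg.get("content", "")
--
--         if role == "human":
--             api_role = "user"
--         elif role == "holly":
--             api_role = "assistant"
--         elif role == "system":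
--             api_role = "user"
--             content = f"[System] {content}"
--         else:
--             api_role = "user"
--
--         # Merge consecutive same-role messages
--         if api_role == last_role and messages:
--             prev = messages[-1]
--             if isinstance(prev["content"], str):
--                 prev["content"] = prev["content"] + "\n" + content
--             continue
--
--         messages.append({"role": api_role, "content": content})
--         last_role = api_role
--
--     # Ensure the conversation starts with a user message
--     if messages and messages[0]["role"] != "user":
--         messages.insert(0, {"role": "user", "content": "[Session start]"})
--
--     # Ensure alternation — insert bridging messages where needed
--     fixed = []
--     for i, msg in enumerate(messages):
--         if fixed and msg["role"] == fixed[-1]["role"]: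
--             # Insert a bridge
--             if msg["role"] == "user":
--                 fixed.append({"role": "assistant", "content": "..."})
--             else:
--                 fixed.append({"role": "user", "content": "[continue]"})
--         fixed.append(msg)
--
--     return fixed
-- ===== SOURCE B (Python) =====
-- def _build_anthropic_messages(history):
--     """Normalize each message once, then group consecutive same-role runs
--     (joining contents with newlines) and prepend a session-start user turn
--     if needed; grouping yields alternating turns by construction."""
--     def norm(msg):
--         role = msg.get("role", "user")
--         content = msg.get("content", "")
--         if role == "holly":
--             return ("assistant", content)
--         if role == "system":
--             return ("user", "[System] " + str(content))
--         return ("user", content)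
--
--     pairs = [norm(m) for m in history]
--     messages = []
--     i = 0
--     n = len(pairs)
--     while i < n:
--         role = pairs[i][0]
--         j = i
--         parts = []
--         while j < n and pairs[j][0] == role:
--             parts.append(pairs[j][1])
--             j += 1
--         messages.append({"role": role, "content": "\n".join(parts)})
--         i = j
--
--     if messages and messages[0]["role"] != "user":
--         messages.insert(0, {"role": "user", "content": "[Session start]"})
--     return messages
-- ===== Notes on version B (the rewrite author's own statement) =====
-- stated objective: simpler
-- what changed: B normalizes each message once and groups consecutive same-role runs, joining contents with '\n' per run, so the stateful merge-with-last_role loop and the entire second bridging pass disappear (grouped runs alternate by construction).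
import Mathlib
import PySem

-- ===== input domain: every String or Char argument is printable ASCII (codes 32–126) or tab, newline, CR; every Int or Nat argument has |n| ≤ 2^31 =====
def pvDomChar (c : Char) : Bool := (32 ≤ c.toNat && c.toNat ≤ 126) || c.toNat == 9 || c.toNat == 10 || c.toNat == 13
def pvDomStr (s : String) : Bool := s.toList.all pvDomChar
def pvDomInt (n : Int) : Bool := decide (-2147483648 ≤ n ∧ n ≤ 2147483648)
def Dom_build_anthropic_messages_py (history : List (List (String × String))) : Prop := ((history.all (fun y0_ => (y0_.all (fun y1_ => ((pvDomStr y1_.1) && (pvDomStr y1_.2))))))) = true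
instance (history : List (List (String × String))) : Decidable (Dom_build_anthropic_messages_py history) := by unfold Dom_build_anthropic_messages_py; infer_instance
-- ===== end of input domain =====

-- B replaces A's stateful merge loop plus separate bridging pass by a one-shot normalize-then-group
-- decomposition (objective: simpler). Values here are all Strings, so A's isinstance(prev["content"], str)
-- test is always true and is dropped in the port.

-- ===== PORT A =====
-- msg.get(k, d) on an association-list dict (first match, exact Python dict semantics)
def pvGetD (xs : List (String × String)) (k d : String) : String :=
  PySem.Dict.getD ⟨xs⟩ k d
-- d[k] = v on an association-list dict (overwrite in place)
def pvSet (xs : List (String × String)) (k v : String) : List (String × String) :=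
  (PySem.Dict.insert ⟨xs⟩ k v).items

-- update the content of the LAST dict in messages (prev["content"] = prev["content"] + "\n" + content)
def pvUpdateLast (ms : List (List (String × String))) (c : String) : List (List (String × String)) :=
  match ms with
  | [] => []
  | [d] => [pvSet d "content" (pvGetD d "content" "" ++ "\n" ++ c)]
  | d :: rest => d :: pvUpdateLast rest c

-- one iteration of A's first for-loop; state = (messages, last_role)
def pvAStep (st : List (List (String × String)) × Option String) (msg : List (String × String)) :
    List (List (String × String)) × Option String :=
  let role := pvGetD msg "role" "user"
  let content := pvGetD msg "content" ""
  let (api_role, content) :=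
    if role == "human" then ("user", content)
    else if role == "holly" then ("assistant", content)
    else if role == "system" then ("user", "[System] " ++ content)
    else ("user", content)
  let (messages, last_role) := st
  if last_role == some api_role && !messages.isEmpty then
    (pvUpdateLast messages content, last_role)
  else
    (messages ++ [[("role", api_role), ("content", content)]], some api_role)

-- one iteration of A's second (bridging) for-loop; state = fixed
def pvBridgeStep (fixed : List (List (String × String))) (msg : List (String × String)) :
    List (List (String × String)) :=
  let fixed :=
    if !fixed.isEmpty &&
        (pvGetD msg "role" "" == pvGetD ((fixed.getLast?).getD []) "role" "") then
      if pvGetD msg "role" "" == "user" then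
        fixed ++ [[("role", "assistant"), ("content", "...")]]
      else
        fixed ++ [[("role", "user"), ("content", "[continue]")]]
    else fixed
  fixed ++ [msg]

def build_anthropic_messages_py (history : List (List (String × String))) : List (List (String × String)) :=
  let st := history.foldl pvAStep ([], none)
  let messages := st.1
  let messages :=
    if !messages.isEmpty && !(pvGetD (messages.headD []) "role" "" == "user") then
      [("role", "user"), ("content", "[Session start]")] :: messages
    else messages
  messages.foldl pvBridgeStep []

-- ===== PORT B =====
def pvNorm (msg : List (String × String)) : String × String :=
  let role := pvGetD msg "role" "user"
  let content := pvGetD msg "content" ""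
  if role == "holly" then ("assistant", content)
  else if role == "system" then ("user", "[System] " ++ content)
  else ("user", content)

-- inner while loop of B: collect the contents of the leading run with the given role,
-- returning (parts, remaining pairs)
def pvCollect (role : String) (ps : List (String × String)) : List String × List (String × String) :=
  match ps with
  | [] => ([], [])
  | (r, c) :: rest =>
    if r == role then
      let (parts, rest') := pvCollect role rest
      (c :: parts, rest')
    else ([], (r, c) :: rest)

theorem pvCollect_snd_length_le (role : String) (ps : List (String × String)) :
    (pvCollect role ps).2.length ≤ ps.length := by
  induction ps with
  | nil => simp [pvCollect]
  | cons p rest ih =>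
    obtain ⟨r, c⟩ := p
    simp only [pvCollect]
    split
    · simpa using Nat.le_succ_of_le ih
    · simp

-- outer while loop of B: group consecutive same-role pairs into messages
def pvGroup (ps : List (String × String)) : List (List (String × String)) :=
  match ps with
  | [] => []
  | (r, c) :: rest =>
    let pr := pvCollect r rest
    [("role", r), ("content", PySem.Str.join "\n" (c :: pr.1))] :: pvGroup pr.2
termination_by ps.length
decreasing_by
  exact Nat.lt_succ_of_le (pvCollect_snd_length_le r rest)

def build_anthropic_messages_py_alt (history : List (List (String × String))) : List (List (String × String)) :=
  let pairs := history.map pvNorm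
  let messages := pvGroup pairs
  if !messages.isEmpty && !(pvGetD (messages.headD []) "role" "" == "user") then
    [("role", "user"), ("content", "[Session start]")] :: messages
  else messages

-- ===== PRECONDITION & SPEC =====
def Spec_build_anthropic_messages_py (history : List (List (String × String))) (out : List (List (String × String))) : Prop := out = build_anthropic_messages_py_alt history
instance (history : List (List (String × String))) (out : List (List (String × String))) : Decidable (Spec_build_anthropic_messages_py history out) := by unfold Spec_build_anthropic_messages_py; infer_instance

-- ===== CLAIM (what is proved, stated in full; the proofs are below) =====
def Claim_equal_build_anthropic_messages_py : Prop := ∀ (history : List (List (String × String))), Dom_build_anthropic_messages_py history → Spec_build_anthropic_messages_py history (build_anthropic_messages_py history)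


-- ===== LEMMAS AND PROOFS =====

-- proof-side abbreviations
def pvMkMsg (r c : String) : List (String × String) := [("role", r), ("content", c)]
def pvRole (d : List (String × String)) : String := pvGetD d "role" ""

-- pvAStep after normalization: the same step acting on an already-normalized (role, content) pair
def pvPairStep (st : List (List (String × String)) × Option String) (p : String × String) :
    List (List (String × String)) × Option String :=
  if st.2 == some p.1 && !st.1.isEmpty then (pvUpdateLast st.1 p.2, st.2)
  else (st.1 ++ [pvMkMsg p.1 p.2], some p.1)

theorem pvJoin_singleton (a : String) : PySem.Str.join "\n" [a] = a := by
  simp [PySem.Str.join]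

theorem pvJoin_shift (a c : String) (l : List String) :
    PySem.Str.join "\n" (a :: c :: l) = PySem.Str.join "\n" ((a ++ "\n" ++ c) :: l) := by
  refine String.toList_inj.mp ?_
  cases l with
  | nil => simp [PySem.Str.join, PySem.Chars.join_cons_cons, PySem.Chars.join_singleton]
  | cons x xs => simp [PySem.Str.join, PySem.Chars.join_cons_cons]

theorem pvGetD_role (r c d : String) : pvGetD (pvMkMsg r c) "role" d = r := by
  simp [pvGetD, pvMkMsg, PySem.Dict.getD, PySem.Dict.get?_mk_cons]

theorem pvGetD_content (r c d : String) : pvGetD (pvMkMsg r c) "content" d = c := by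
  simp [pvGetD, pvMkMsg, PySem.Dict.getD, PySem.Dict.get?_mk_cons]

theorem pvRole_mkMsg (r c : String) : pvRole (pvMkMsg r c) = r := pvGetD_role r c ""

theorem pvSet_content (r c v : String) :
    pvSet (pvMkMsg r c) "content" v = pvMkMsg r v := by
  simp [pvSet, pvMkMsg, PySem.Dict.items_insert, PySem.Dict.contains_mk]

theorem pvUpdateLast_append (ms : List (List (String × String))) (d : List (String × String))
    (c : String) :
    pvUpdateLast (ms ++ [d]) c = ms ++ [pvSet d "content" (pvGetD d "content" "" ++ "\n" ++ c)] := by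
  induction ms with
  | nil => simp [pvUpdateLast]
  | cons m ms ih =>
      cases hms : ms ++ [d] with
      | nil => simp at hms
      | cons x xs =>
          simp only [List.cons_append, hms, pvUpdateLast]
          rw [← hms, ih]

theorem pvAStep_eq_pairStep (st : List (List (String × String)) × Option String)
    (msg : List (String × String)) : pvAStep st msg = pvPairStep st (pvNorm msg) := by
  unfold pvAStep pvNorm
  by_cases h1 : pvGetD msg "role" "user" = "human"
  · simp [h1, pvPairStep, pvMkMsg]
  · by_cases h2 : pvGetD msg "role" "user" = "holly"
    · simp [h1, h2, pvPairStep, pvMkMsg]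
    · by_cases h3 : pvGetD msg "role" "user" = "system"
      · simp [h1, h2, h3, pvPairStep, pvMkMsg]
      · simp [h1, h2, h3, pvPairStep, pvMkMsg]

theorem pvFoldl_A_eq_pair (history : List (List (String × String)))
    (st : List (List (String × String)) × Option String) :
    history.foldl pvAStep st = (history.map pvNorm).foldl pvPairStep st := by
  induction history generalizing st with
  | nil => rfl
  | cons m hist ih => simp [List.foldl, pvAStep_eq_pairStep, ih]

theorem pvCore (ps : List (String × String)) (ms : List (List (String × String)))
    (r acc : String) :
    (List.foldl pvPairStep (ms ++ [pvMkMsg r acc], some r) ps).1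
      = ms ++ pvMkMsg r (PySem.Str.join "\n" (acc :: (pvCollect r ps).1))
          :: pvGroup (pvCollect r ps).2 := by
  induction ps generalizing ms r acc with
  | nil => simp [pvCollect, pvGroup, pvJoin_singleton]
  | cons p rest ih =>
      obtain ⟨r', c⟩ := p
      by_cases h : r' = r
      · subst h
        have hstep : pvPairStep (ms ++ [pvMkMsg r' acc], some r') (r', c)
            = (ms ++ [pvMkMsg r' (acc ++ "\n" ++ c)], some r') := by
          simp [pvPairStep, pvUpdateLast_append, pvGetD_content, pvSet_content]
        simp only [List.foldl_cons, hstep, ih, pvCollect, BEq.rfl]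
        simp [pvJoin_shift]
      · have hstep : pvPairStep (ms ++ [pvMkMsg r acc], some r) (r', c)
            = ((ms ++ [pvMkMsg r acc]) ++ [pvMkMsg r' c], some r') := by
          have : (some r == some r') = false := by
            simp [beq_eq_false_iff_ne]; exact fun hh => h hh.symm
          simp [pvPairStep, this]
        have hcoll : pvCollect r ((r', c) :: rest) = ([], (r', c) :: rest) := by
          simp [pvCollect, h]
        rw [List.foldl_cons, hstep, ih, hcoll]
        rw [pvGroup]
        simp [pvJoin_singleton, pvMkMsg]

theorem pvMessages_eq (history : List (List (String × String))) :
    (history.foldl pvAStep ([], none)).1 = pvGroup (history.map pvNorm) := by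
  rw [pvFoldl_A_eq_pair]
  cases hmap : history.map pvNorm with
  | nil => simp [pvGroup]
  | cons p rest =>
      obtain ⟨r, c⟩ := p
      have hstep : pvPairStep ([], none) (r, c) = ([pvMkMsg r c], some r) := by
        simp [pvPairStep]
      rw [List.foldl_cons, hstep]
      have := pvCore rest [] r c
      simp only [List.nil_append] at this
      rw [this, pvGroup]
      simp [pvMkMsg]

theorem pvCollect_head_ne (ps : List (String × String)) (r : String) (p : String × String)
    (h : (pvCollect r ps).2.head? = some p) : p.1 ≠ r := by
  induction ps with
  | nil => simp [pvCollect] at h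
  | cons q rest ih =>
      obtain ⟨r0, c0⟩ := q
      by_cases hq : r0 = r
      · subst hq
        rw [show pvCollect r0 ((r0, c0) :: rest)
              = (c0 :: (pvCollect r0 rest).1, (pvCollect r0 rest).2) from by
            simp [pvCollect]] at h
        exact ih h
      · rw [show pvCollect r ((r0, c0) :: rest) = ([], (r0, c0) :: rest) from by
            simp [pvCollect, hq]] at h
        simp only [List.head?_cons, Option.some_inj] at h
        subst h
        simpa using hq

theorem pvGroup_chain_aux (n : Nat) :
    ∀ ps : List (String × String), ps.length ≤ n →
      List.IsChain (fun a b => pvRole a ≠ pvRole b) (pvGroup ps) := by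
  induction n with
  | zero =>
      intro ps h
      have : ps = [] := List.eq_nil_of_length_eq_zero (Nat.le_zero.mp h)
      subst this
      simp [pvGroup]
  | succ n ih =>
      intro ps h
      cases ps with
      | nil => simp [pvGroup]
      | cons q rest =>
          obtain ⟨r, c⟩ := q
          rw [pvGroup]
          rw [List.isChain_cons']
          constructor
          · intro b hb
            cases h2 : (pvCollect r rest).2 with
            | nil => rw [h2, pvGroup] at hb; simp at hb
            | cons q2 t =>
                obtain ⟨r2, c2⟩ := q2
                rw [h2, pvGroup] at hb
                simp only [List.head?_cons, Option.mem_def, Option.some_inj] at hb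
                subst hb
                have hr2 : r2 ≠ r :=
                  pvCollect_head_ne rest r (r2, c2) (by rw [h2]; simp)
                have e1 : pvRole ([("role", r), ("content",
                    PySem.Str.join "\n" (c :: (pvCollect r rest).1))]) = r := pvRole_mkMsg _ _
                have e2 : pvRole ([("role", r2), ("content",
                    PySem.Str.join "\n" (c2 :: (pvCollect r2 t).1))]) = r2 := pvRole_mkMsg _ _
                rw [e1, e2]
                exact fun hrr => hr2 hrr.symm
          · exact ih _ (Nat.le_trans (pvCollect_snd_length_le r rest)
              (Nat.le_of_succ_le_succ h))

theorem pvGroup_chain (ps : List (String × String)) :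
    List.IsChain (fun a b => pvRole a ≠ pvRole b) (pvGroup ps) :=
  pvGroup_chain_aux ps.length ps (Nat.le_refl _)

theorem pvBridge_id (msgs : List (List (String × String))) :
    ∀ acc : List (List (String × String)),
      List.IsChain (fun a b => pvRole a ≠ pvRole b) msgs →
      (∀ a ∈ acc.getLast?, ∀ b ∈ msgs.head?, pvRole b ≠ pvRole a) →
      msgs.foldl pvBridgeStep acc = acc ++ msgs := by
  induction msgs with
  | nil => intro acc _ _; simp
  | cons m rest ih =>
      intro acc hchain hacc
      have hstep : pvBridgeStep acc m = acc ++ [m] := by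
        cases hacc' : acc.getLast? with
        | none =>
            have : acc = [] := by
              cases acc with
              | nil => rfl
              | cons x xs => simp [List.getLast?_eq_getLast] at hacc'
            simp [pvBridgeStep, this]
        | some a =>
            have hne : pvRole m ≠ pvRole a := hacc a hacc' m rfl
            have hcond : (!acc.isEmpty &&
                (pvGetD m "role" "" == pvGetD ((acc.getLast?).getD []) "role" "")) = false := by
              rw [hacc']
              have : (pvGetD m "role" "" == pvGetD a "role" "") = false := by
                simpa [beq_eq_false_iff_ne, pvRole] using hne
              simp [this]
            simp [pvBridgeStep, hcond]
      rw [List.foldl_cons, hstep, ih (acc ++ [m]) ((List.isChain_cons'.mp hchain).2)]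
      · simp
      · intro a ha b hb
        rw [List.getLast?_concat] at ha
        simp only [Option.mem_def, Option.some_inj] at ha
        subst ha
        have := (List.isChain_cons'.mp hchain).1
        exact fun hh => (this b hb) hh.symm

theorem pvFinal (history : List (List (String × String))) :
    build_anthropic_messages_py history = build_anthropic_messages_py_alt history := by
  simp only [build_anthropic_messages_py, build_anthropic_messages_py_alt]
  rw [pvMessages_eq]
  have hchainG : List.IsChain (fun a b => pvRole a ≠ pvRole b)
      (pvGroup (history.map pvNorm)) := pvGroup_chain _
  set G := pvGroup (history.map pvNorm) with hG
  by_cases hc : (!G.isEmpty && !(pvGetD (G.headD []) "role" "" == "user")) = true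
  · rw [if_pos hc]
    refine pvBridge_id _ [] ?_ (by intro a ha _ _; simp at ha)
    rw [List.isChain_cons']
    refine ⟨?_, hchainG⟩
    intro b hb
    have hc2 : ¬ pvGetD (G.headD []) "role" "" = "user" := by
      have hh := hc
      simp only [Bool.and_eq_true, Bool.not_eq_eq_eq_not, Bool.not_true,
        beq_eq_false_iff_ne] at hh
      exact hh.2
    have hhead : G.head? = some b := hb
    have hheadD : G.headD [] = b := by
      cases hG2 : G with
      | nil => rw [hG2] at hhead; simp at hhead
      | cons g gs =>
          rw [hG2] at hhead
          simp only [List.head?_cons, Option.some_inj] at hhead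
          simp [hhead]
    have hb0 : pvRole b ≠ "user" := by
      intro hh
      apply hc2
      rw [hheadD]
      simpa [pvRole] using hh
    have huser : pvRole ([("role", "user"), ("content", "[Session start]")]) = "user" :=
      pvRole_mkMsg "user" "[Session start]"
    rw [huser]
    exact fun hh => hb0 hh.symm
  · rw [if_neg hc]
    exact pvBridge_id _ [] hchainG (by intro a ha _ _; simp at ha)

-- ===== VERDICT (by name: the statement is the Claim_ definition above) =====
theorem build_anthropic_messages_py_spec : Claim_equal_build_anthropic_messages_py := by
  intro history _
  unfold Spec_build_anthropic_messages_py
  exact pvFinal history
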